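-- pv_equiv track=rewrite | github.com/Q-CAD/parse2fit | parse2fit/tools/fileconverter.py | _clean_element
-- ===== SOURCE A (Python) =====
-- def _clean_element(dirty_el):
--     clean_el = ''
--     count = 0
--     for idx, i in enumerate(dirty_el):
--         if not i.isdigit():
--             if count == 0: # Only capitalize first letter
--                 clean_el += i.upper()
--             else:
--                 clean_el += i.lower()
--             count += 1
--         else:
--             clean_el += ' ' # Ensure correct spacing
--     return clean_el
-- ===== SOURCE B (Python) =====
-- def _clean_element(dirty_el):
--     # build-then-fixup: normalize everything, then capitalize the first non-digit slot
--     norm = [' ' if ch.isdigit() else ch.lower() for ch in dirty_el]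
--     for i, ch in enumerate(dirty_el):
--         if not ch.isdigit():
--             norm[i] = ch.upper()
--             break
--     return ''.join(norm)
-- ===== Notes on version B (the rewrite author's own statement) =====
-- stated objective: alternative
-- what changed: Replaces A's single accumulate-with-count loop by a build-then-fixup decomposition: one pass normalizes (digit->space, else lowercase), then a separate short loop uppercases the first non-digit position.
import Mathlib
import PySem

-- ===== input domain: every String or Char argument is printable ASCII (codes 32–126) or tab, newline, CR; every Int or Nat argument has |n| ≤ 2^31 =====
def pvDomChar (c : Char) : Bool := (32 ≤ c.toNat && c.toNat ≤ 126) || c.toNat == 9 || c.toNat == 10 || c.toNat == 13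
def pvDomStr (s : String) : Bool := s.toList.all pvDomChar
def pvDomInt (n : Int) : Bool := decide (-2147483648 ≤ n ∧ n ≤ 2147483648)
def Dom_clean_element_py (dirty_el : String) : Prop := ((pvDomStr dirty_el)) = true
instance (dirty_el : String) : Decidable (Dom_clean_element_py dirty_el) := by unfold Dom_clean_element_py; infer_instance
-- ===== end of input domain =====

-- B changes the decomposition (normalize-all then fixup the first non-digit) — alternative, same cost.

-- ===== PORT A =====
-- the for-loop's state: (clean_el so far, count)
def pvStepA (st : List Char × Int) (i : Char) : List Char × Int :=
  if ¬ (PySem.Chars.isdigit i = true) then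
    (st.1 ++ [if st.2 = 0 then PySem.Chars.upperChar i else PySem.Chars.lowerChar i], st.2 + 1)
  else
    (st.1 ++ [' '], st.2)

def clean_element_py (dirty_el : String) : String :=
  String.ofList (dirty_el.toList.foldl pvStepA ([], 0)).1

-- ===== PORT B =====
-- norm[ch] = ' ' if ch.isdigit() else ch.lower()
def pvNormB (ch : Char) : Char :=
  if PySem.Chars.isdigit ch then ' ' else PySem.Chars.lowerChar ch

-- the fixup loop with break: walk the original and norm in parallel, set the
-- first non-digit slot to ch.upper() and stop
def pvFixB : List Char → List Char → List Char
  | _, [] => []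
  | [], ms => ms
  | c :: cs, m :: ms =>
      if PySem.Chars.isdigit c then m :: pvFixB cs ms
      else PySem.Chars.upperChar c :: ms

def clean_element_py_alt (dirty_el : String) : String :=
  let cs := dirty_el.toList
  String.ofList (pvFixB cs (cs.map pvNormB))

-- ===== PRECONDITION & SPEC =====
def Spec_clean_element_py (dirty_el : String) (out : String) : Prop := out = clean_element_py_alt dirty_el
instance (dirty_el : String) (out : String) : Decidable (Spec_clean_element_py dirty_el out) := by unfold Spec_clean_element_py; infer_instance

-- ===== CLAIM (what is proved, stated in full; the proofs are below) =====
def Claim_equal_clean_element_py : Prop := ∀ (dirty_el : String), Dom_clean_element_py dirty_el → Spec_clean_element_py dirty_el (clean_element_py dirty_el)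

-- ===== LEMMAS AND PROOFS =====

-- once count ≠ 0 A's loop just appends the normalized characters
theorem pvFoldA_pos (cs : List Char) (acc : List Char) (n : Int) (hn : 0 < n) :
    (cs.foldl pvStepA (acc, n)).1 = acc ++ cs.map pvNormB := by
  induction cs generalizing acc n with
  | nil => simp
  | cons c cs ih =>
    by_cases hd : PySem.Chars.isdigit c = true
    · simp [pvStepA, hd, ih _ _ hn, pvNormB]
    · have h1 : pvStepA (acc, n) c = (acc ++ [PySem.Chars.lowerChar c], n + 1) := by
        simp [pvStepA, hd, (show ¬ n = 0 by omega)]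
      rw [List.foldl_cons, h1, ih _ (n + 1) (by omega)]
      simp [pvNormB, hd]

-- from count = 0 A's loop computes B's fixed-up normalization
theorem pvFoldA_zero (cs : List Char) (acc : List Char) :
    (cs.foldl pvStepA (acc, 0)).1 = acc ++ pvFixB cs (cs.map pvNormB) := by
  induction cs generalizing acc with
  | nil => simp [pvFixB]
  | cons c cs ih =>
    by_cases hd : PySem.Chars.isdigit c = true
    · simp [pvStepA, hd, ih, pvFixB, pvNormB]
    · simp [pvStepA, hd, pvFixB, pvFoldA_pos cs _ 1 (by norm_num)]

-- ===== VERDICT (by name: the statement is the Claim_ definition above) =====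
theorem clean_element_py_spec : Claim_equal_clean_element_py := by
  intro s _
  show _ = _
  simp [clean_element_py, clean_element_py_alt, pvFoldA_zero]
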